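-- pv_equiv track=rewrite | github.com/sungguenja/other_Algorithmus_problem | baekjoon_2687_성냥개비.py | solution
-- ===== SOURCE A (Python) =====
-- def solution(matchstick):
--     answerMax = '7' * (matchstick % 2) + '1' * ((matchstick // 2) - (matchstick % 2))
--
--     answerMin = ''
--     useMatchstickCnt = [0, 0, 1, 7, 4, 2, 6, 8, 10, 18, 22]
--     if matchstick <= 10:
--         answerMin = useMatchstickCnt[matchstick]
--     else:
--         while matchstick > 0:
--             matchstick -= 7
--             if matchstick >= 0:
--                 answerMin += '8'
--             else:
--                 matchstick += 7
--                 break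
--
--
--         if matchstick == 1:
--             answerMin = '10' + answerMin[1:]
--         elif matchstick == 2:
--             answerMin = '1' + answerMin
--         elif matchstick == 3:
--             answerMin = '200' + answerMin[2:]
--         elif matchstick == 4:
--             answerMin = '20' + answerMin[1:]
--         elif matchstick == 5:
--             answerMin = '2' + answerMin
--         elif matchstick == 6:
--             answerMin = '6' + answerMin
--
--
--     return str(answerMin) + ' ' + str(answerMax)
-- ===== SOURCE B (Python) =====
-- _MIN_SMALL = [0, 0, 1, 7, 4, 2, 6, 8, 10, 18, 22]
-- # remainder -> (prefix string, how many '8's the prefix replaces)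
-- _PREFIX = {1: ('10', 1), 2: ('1', 0), 3: ('200', 2), 4: ('20', 1), 5: ('2', 0), 6: ('6', 0)}
--
-- def solution(matchstick):
--     if matchstick % 2:
--         answer_max = '7' + '1' * (matchstick // 2 - 1)
--     else:
--         answer_max = '1' * (matchstick // 2)
--     if matchstick <= 10:
--         answer_min = str(_MIN_SMALL[matchstick])
--     else:
--         count, rem = divmod(matchstick, 7)
--         prefix, drop = _PREFIX.get(rem, ('', 0))
--         answer_min = prefix + '8' * (count - drop)
--     return answer_min + ' ' + answer_max
-- ===== Notes on version B (the rewrite author's own statement) =====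
-- stated objective: simpler
-- what changed: The subtract-by-7 while loop with repeated string concatenation is replaced by divmod closed-form arithmetic and a single string-repeat, and the six-way if/elif prefix-rewrite chain (with its slicing) by a remainder-indexed prefix table; the max side is an if/else instead of repeat-by-flag arithmetic.
import Mathlib
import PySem

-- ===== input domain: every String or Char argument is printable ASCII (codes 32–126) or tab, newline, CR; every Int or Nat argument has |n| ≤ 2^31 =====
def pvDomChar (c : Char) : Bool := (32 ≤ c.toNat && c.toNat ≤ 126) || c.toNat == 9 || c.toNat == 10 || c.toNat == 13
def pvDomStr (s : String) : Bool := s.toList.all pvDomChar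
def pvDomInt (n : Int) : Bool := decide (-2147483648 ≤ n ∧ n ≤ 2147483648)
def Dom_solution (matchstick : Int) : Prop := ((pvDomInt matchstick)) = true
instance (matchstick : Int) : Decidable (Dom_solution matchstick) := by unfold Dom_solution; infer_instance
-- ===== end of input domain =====

-- B replaces A's subtract-by-7 while loop and its six-way prefix if/elif chain by
-- divmod closed-form arithmetic and a remainder-indexed prefix table (objective: simpler).

-- ===== PORT A =====
-- the while loop: 'while matchstick > 0: matchstick -= 7; if matchstick >= 0: answerMin += '8' else: matchstick += 7; break'
def solutionLoop (m : Int) (acc : List Char) : Int × List Char :=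
  if m > 0 then
    if m - 7 ≥ 0 then solutionLoop (m - 7) (acc ++ ['8'])
    else (m, acc)
  else (m, acc)
termination_by m.toNat
decreasing_by omega

def solution (matchstick : Int) : String :=
  -- '7' * (matchstick % 2) + '1' * ((matchstick // 2) - (matchstick % 2))
  let answerMax := PySem.List.pyRepeat ['7'] (PySem.Int.mod matchstick 2)
      ++ PySem.List.pyRepeat ['1'] (PySem.Int.floordiv matchstick 2 - PySem.Int.mod matchstick 2)
  let useMatchstickCnt : List Int := [0, 0, 1, 7, 4, 2, 6, 8, 10, 18, 22]
  if matchstick ≤ 10 then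
    -- useMatchstickCnt[matchstick]: pyGet? is none (IndexError) only for matchstick < -11, outside Pre_;
    -- str(answerMin) on the int from the table is PySem.Int.toChars
    String.ofList (PySem.Int.toChars ((PySem.List.pyGet? useMatchstickCnt matchstick).getD 0)
      ++ [' '] ++ answerMax)
  else
    let p := solutionLoop matchstick []
    let answerMin :=
      if p.1 = 1 then ['1','0'] ++ PySem.List.slice p.2 (some 1) none
      else if p.1 = 2 then ['1'] ++ p.2
      else if p.1 = 3 then ['2','0','0'] ++ PySem.List.slice p.2 (some 2) none
      else if p.1 = 4 then ['2','0'] ++ PySem.List.slice p.2 (some 1) none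
      else if p.1 = 5 then ['2'] ++ p.2
      else if p.1 = 6 then ['6'] ++ p.2
      else p.2
    String.ofList (answerMin ++ [' '] ++ answerMax)

-- ===== PORT B =====
def altMinSmall : List Int := [0, 0, 1, 7, 4, 2, 6, 8, 10, 18, 22]

-- remainder -> (prefix, how many '8's the prefix replaces)
def altPrefix : PySem.Dict Int (List Char × Int) := PySem.Dict.mk  -- dict literal, insertion order
  [((1:Int), (['1','0'], (1:Int))), (2, (['1'], 0)), (3, (['2','0','0'], 2)),
   (4, (['2','0'], 1)), (5, (['2'], 0)), (6, (['6'], 0))]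

def solution_alt (matchstick : Int) : String :=
  let answerMax :=
    if PySem.Int.mod matchstick 2 ≠ 0 then
      ['7'] ++ PySem.List.pyRepeat ['1'] (PySem.Int.floordiv matchstick 2 - 1)
    else
      PySem.List.pyRepeat ['1'] (PySem.Int.floordiv matchstick 2)
  if matchstick ≤ 10 then
    String.ofList (PySem.Int.toChars ((PySem.List.pyGet? altMinSmall matchstick).getD 0)
      ++ [' '] ++ answerMax)
  else
    let count := PySem.Int.floordiv matchstick 7
    let rem := PySem.Int.mod matchstick 7
    let pd := (PySem.Dict.get? altPrefix rem).getD ([], 0)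
    String.ofList (pd.1 ++ PySem.List.pyRepeat ['8'] (count - pd.2) ++ [' '] ++ answerMax)

-- ===== PRECONDITION & SPEC =====
-- Pre_ excludes only the inputs on which both Pythons raise IndexError at the lookup-table access
-- (negative indices below what the 11-entry table admits); no input on which A returns is excluded.
def Pre_solution (matchstick : Int) : Prop := -11 ≤ matchstick
instance (matchstick : Int) : Decidable (Pre_solution matchstick) := by unfold Pre_solution; infer_instance
def pvWitness_solution : Int := 25

def Spec_solution (matchstick : Int) (out : String) : Prop := out = solution_alt matchstick
instance (matchstick : Int) (out : String) : Decidable (Spec_solution matchstick out) := by unfold Spec_solution; infer_instance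

-- ===== CLAIM (what is proved, stated in full; the proofs are below) =====
def Claim_equal_solution : Prop := ∀ (matchstick : Int), Dom_solution matchstick → Pre_solution matchstick → Spec_solution matchstick (solution matchstick)

-- ===== LEMMAS AND PROOFS =====

lemma pv_fdiv_eq (m b : Int) (hb : 0 ≤ b) : PySem.Int.floordiv m b = m / b := by
  simp [PySem.Int.floordiv, Int.fdiv_eq_ediv, hb]

lemma pv_fmod_eq (m b : Int) (hb : 0 ≤ b) : PySem.Int.mod m b = m % b := by
  simp [PySem.Int.mod, Int.fmod_eq_emod, hb]

-- characterisation of A's while loop on nonnegative input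
lemma solutionLoop_eq (n : Nat) : ∀ (m : Int), m.toNat ≤ n → 0 ≤ m → ∀ acc,
    solutionLoop m acc = (m % 7, acc ++ List.replicate (m / 7).toNat '8') := by
  induction n with
  | zero =>
    intro m hn hm acc
    have hm0 : m = 0 := by omega
    subst hm0
    rw [solutionLoop]
    norm_num
  | succ k ih =>
    intro m hn hm acc
    rw [solutionLoop]
    by_cases h1 : m > 0
    · by_cases h2 : m - 7 ≥ 0
      · rw [if_pos h1, if_pos h2, ih (m - 7) (by omega) (by omega) (acc ++ ['8'])]
        have hq : m / 7 = (m - 7) / 7 + 1 := by omega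
        have hq0 : 0 ≤ (m - 7) / 7 := Int.ediv_nonneg (by omega) (by norm_num)
        have hmod : m % 7 = (m - 7) % 7 := by omega
        rw [hmod, hq]
        have : ((m - 7) / 7 + 1).toNat = ((m - 7) / 7).toNat + 1 := by omega
        rw [this, List.replicate_succ, List.append_assoc]
        rfl
      · have hq : m / 7 = 0 := by omega
        have hr : m % 7 = m := by omega
        rw [if_pos h1, if_neg h2, hq, hr]
        simp
    · have hm0 : m = 0 := by omega
      subst hm0
      norm_num

-- the two forms of answerMax coincide
lemma answerMax_eq (m : Int) :
    PySem.List.pyRepeat ['7'] (PySem.Int.mod m 2)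
      ++ PySem.List.pyRepeat ['1'] (PySem.Int.floordiv m 2 - PySem.Int.mod m 2)
    = (if PySem.Int.mod m 2 ≠ 0 then
        ['7'] ++ PySem.List.pyRepeat ['1'] (PySem.Int.floordiv m 2 - 1)
      else
        PySem.List.pyRepeat ['1'] (PySem.Int.floordiv m 2)) := by
  have hmod := pv_fmod_eq m 2 (by norm_num)
  have hdiv := pv_fdiv_eq m 2 (by norm_num)
  simp only [PySem.List.pyRepeat_singleton, hmod, hdiv]
  rcases Int.emod_two_eq m with h | h
  · simp [h]
  · rw [h]
    norm_num [List.replicate_succ]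

theorem solution_spec : Claim_equal_solution := by
  intro m _ hpre
  unfold Spec_solution solution solution_alt
  by_cases hle : m ≤ 10
  · -- finitely many inputs: -11 ≤ m ≤ 10
    simp only [if_pos hle]
    rw [answerMax_eq]
    unfold Pre_solution at hpre
    interval_cases m <;> rfl
  · -- m ≥ 11: closed form vs loop
    simp only [if_neg hle, answerMax_eq]
    rw [not_le] at hle
    have h0 : (0:Int) ≤ m := by omega
    rw [solutionLoop_eq m.toNat m le_rfl h0 []]
    rw [pv_fdiv_eq m 7 (by norm_num), pv_fmod_eq m 7 (by norm_num),
        PySem.List.pyRepeat_singleton]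
    set q := m / 7 with hqdef
    set r := m % 7 with hrdef
    have hq1 : 1 ≤ q := by omega
    have hr : r = 0 ∨ r = 1 ∨ r = 2 ∨ r = 3 ∨ r = 4 ∨ r = 5 ∨ r = 6 := by omega
    have hq2 : (r = 1 ∨ r = 3) → 2 ≤ q := by omega
    simp only [List.nil_append]
    have e1 : (q - (1:Int)).toNat = q.toNat - 1 := by omega
    have e2 : (q - (2:Int)).toNat = q.toNat - Int.toNat 2 := by omega
    have g0 : PySem.Dict.get? altPrefix 0 = none := by decide
    have g1 : PySem.Dict.get? altPrefix 1 = some (['1','0'], 1) := by decide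
    have g2 : PySem.Dict.get? altPrefix 2 = some (['1'], 0) := by decide
    have g3 : PySem.Dict.get? altPrefix 3 = some (['2','0','0'], 2) := by decide
    have g4 : PySem.Dict.get? altPrefix 4 = some (['2','0'], 1) := by decide
    have g5 : PySem.Dict.get? altPrefix 5 = some (['2'], 0) := by decide
    have g6 : PySem.Dict.get? altPrefix 6 = some (['6'], 0) := by decide
    rcases hr with h | h | h | h | h | h | h <;>
      simp only [h] <;>
      norm_num [g0, g1, g2, g3, g4, g5, g6,
        PySem.List.slice_from_one, PySem.List.slice_from _ (by norm_num : (0:Int) ≤ 2),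
        List.tail_replicate, List.drop_replicate, e1, e2]
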